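-- pv_equiv track=rewrite | github.com/ktjayamanna/x-allocator | src/profiler/exporter.py | _compute_tensor_lifetime
-- ===== SOURCE A (Python) =====
-- from typing import Any, Dict, List, Optional, Tuple
--
-- def _compute_tensor_lifetime(
--     tensor_id: int,
--     tensor_producers: Dict[int, int],
--     tensor_consumers: Dict[int, List[int]],
--     num_ops_per_iter: Optional[int],
-- ) -> str:
--     """
--     Compute tensor lifetime based on which iterations it appears in.
--
--     Returns:
--         "persistent" - tensor appears in multiple iterations (worth converting during idle time)
--         "batch_specific" - tensor only appears in one iteration (not worth converting)
--         "unknown" - not enough profiling data to determine (need iters >= 2)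
--     """
--     if num_ops_per_iter is None or num_ops_per_iter == 0:
--         return "unknown"
--
--     # Collect all op_ids where this tensor appears (as input or output)
--     all_op_ids = []
--
--     if tensor_id in tensor_producers:
--         all_op_ids.append(tensor_producers[tensor_id])
--
--     if tensor_id in tensor_consumers:
--         all_op_ids.extend(tensor_consumers[tensor_id])
--
--     if not all_op_ids:
--         return "unknown"
--
--     # Convert op_ids to iteration numbers
--     iterations = {op_id // num_ops_per_iter for op_id in all_op_ids}
--
--     # If tensor appears in multiple iterations, it's persistent
--     if len(iterations) > 1:
--         return "persistent"
--     else: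
--         return "batch_specific"
-- ===== SOURCE B (Python) =====
-- def _compute_tensor_lifetime(
--     tensor_id,
--     tensor_producers,
--     tensor_consumers,
--     num_ops_per_iter,
-- ):
--     if num_ops_per_iter is None or num_ops_per_iter == 0:
--         return "unknown"
--
--     # Scalar-and-early-exit distinctness test: track the first iteration seen;
--     # bail out with "persistent" as soon as a second distinct iteration appears.
--     first_iter = None
--     if tensor_id in tensor_producers:
--         first_iter = tensor_producers[tensor_id] // num_ops_per_iter
--
--     for op_id in tensor_consumers.get(tensor_id, []):
--         it = op_id // num_ops_per_iter
--         if first_iter is None: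
--             first_iter = it
--         elif it != first_iter:
--             return "persistent"
--
--     if first_iter is None:
--         return "unknown"
--     return "batch_specific"
-- ===== Notes on version B (the rewrite author's own statement) =====
-- stated objective: simpler
-- what changed: Replaces materialising the op_id list and a set of iteration numbers with a single pass over the consumers that keeps one scalar first_iter and returns 'persistent' immediately on the first distinct iteration.
import Mathlib
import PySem

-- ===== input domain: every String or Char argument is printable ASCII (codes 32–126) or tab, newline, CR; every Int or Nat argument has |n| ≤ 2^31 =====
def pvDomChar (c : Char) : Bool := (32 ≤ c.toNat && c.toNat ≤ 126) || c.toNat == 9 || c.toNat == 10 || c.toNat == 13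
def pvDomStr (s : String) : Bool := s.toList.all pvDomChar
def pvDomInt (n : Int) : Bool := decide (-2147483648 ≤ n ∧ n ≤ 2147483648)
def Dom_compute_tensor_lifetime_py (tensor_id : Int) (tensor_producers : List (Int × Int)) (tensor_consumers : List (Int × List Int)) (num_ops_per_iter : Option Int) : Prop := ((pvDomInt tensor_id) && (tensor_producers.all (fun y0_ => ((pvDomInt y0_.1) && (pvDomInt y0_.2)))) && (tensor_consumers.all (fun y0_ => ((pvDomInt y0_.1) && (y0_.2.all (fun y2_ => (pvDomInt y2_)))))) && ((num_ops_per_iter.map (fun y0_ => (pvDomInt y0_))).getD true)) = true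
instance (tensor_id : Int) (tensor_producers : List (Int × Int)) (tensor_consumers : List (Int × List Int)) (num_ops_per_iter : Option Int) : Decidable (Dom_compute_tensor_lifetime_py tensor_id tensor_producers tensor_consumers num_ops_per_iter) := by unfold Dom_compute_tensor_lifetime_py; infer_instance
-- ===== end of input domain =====

-- B replaces A's set of iteration numbers with a single-pass scalar first_iter and an
-- early "persistent" exit on the first distinct iteration (simpler; O(1) extra space).

-- ===== PORT A =====
def compute_tensor_lifetime_py (tensor_id : Int) (tensor_producers : List (Int × Int)) (tensor_consumers : List (Int × List Int)) (num_ops_per_iter : Option Int) : String :=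
  match num_ops_per_iter with
  | none => "unknown"
  | some n =>
    if n = 0 then "unknown"
    else
      let ids1 : List Int :=
        if PySem.Dict.contains (PySem.Dict.mk tensor_producers) tensor_id then
          [(PySem.Dict.get? (PySem.Dict.mk tensor_producers) tensor_id).getD 0]
        else []
      let all_op_ids : List Int := ids1 ++
        (if PySem.Dict.contains (PySem.Dict.mk tensor_consumers) tensor_id then
          (PySem.Dict.get? (PySem.Dict.mk tensor_consumers) tensor_id).getD []
        else [])
      if all_op_ids = [] then "unknown"
      else
        let iterations : PySem.Set Int :=
          PySem.Set.ofList (all_op_ids.map (fun op_id => PySem.Int.floordiv op_id n))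
        if 1 < iterations.length then "persistent" else "batch_specific"

-- ===== PORT B =====
-- the for-loop of Source B with its trailing 'if first_iter is None' fall-through
def pvAltLoop (n : Int) : Option Int → List Int → String
  | first, [] => match first with | none => "unknown" | some _ => "batch_specific"
  | first, op_id :: rest =>
    let it := PySem.Int.floordiv op_id n
    match first with
    | none => pvAltLoop n (some it) rest
    | some f => if it ≠ f then "persistent" else pvAltLoop n (some f) rest

def compute_tensor_lifetime_py_alt (tensor_id : Int) (tensor_producers : List (Int × Int)) (tensor_consumers : List (Int × List Int)) (num_ops_per_iter : Option Int) : String :=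
  match num_ops_per_iter with
  | none => "unknown"
  | some n =>
    if n = 0 then "unknown"
    else
      let first : Option Int :=
        (PySem.Dict.get? (PySem.Dict.mk tensor_producers) tensor_id).map (fun p => PySem.Int.floordiv p n)
      pvAltLoop n first (PySem.Dict.getD (PySem.Dict.mk tensor_consumers) tensor_id [])

-- ===== PRECONDITION & SPEC =====
def Spec_compute_tensor_lifetime_py (tensor_id : Int) (tensor_producers : List (Int × Int)) (tensor_consumers : List (Int × List Int)) (num_ops_per_iter : Option Int) (out : String) : Prop := out = compute_tensor_lifetime_py_alt tensor_id tensor_producers tensor_consumers num_ops_per_iter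
instance (tensor_id : Int) (tensor_producers : List (Int × Int)) (tensor_consumers : List (Int × List Int)) (num_ops_per_iter : Option Int) (out : String) : Decidable (Spec_compute_tensor_lifetime_py tensor_id tensor_producers tensor_consumers num_ops_per_iter out) := by unfold Spec_compute_tensor_lifetime_py; infer_instance

-- ===== CLAIM (what is proved, stated in full; the proofs are below) =====
def Claim_equal_compute_tensor_lifetime_py : Prop := ∀ (tensor_id : Int) (tensor_producers : List (Int × Int)) (tensor_consumers : List (Int × List Int)) (num_ops_per_iter : Option Int), Dom_compute_tensor_lifetime_py tensor_id tensor_producers tensor_consumers num_ops_per_iter → Spec_compute_tensor_lifetime_py tensor_id tensor_producers tensor_consumers num_ops_per_iter (compute_tensor_lifetime_py tensor_id tensor_producers tensor_consumers num_ops_per_iter)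

-- ===== LEMMAS AND PROOFS =====

-- B's loop with a seeded first_iter is a distinctness test against that seed
lemma pvAltLoop_some (n x : Int) (l : List Int) :
    pvAltLoop n (some x) l =
      if l.any (fun op => decide (PySem.Int.floordiv op n ≠ x)) then "persistent"
      else "batch_specific" := by
  induction l with
  | nil => simp [pvAltLoop]
  | cons op rest ih =>
    simp only [pvAltLoop, List.any_cons]
    by_cases h : PySem.Int.floordiv op n = x
    · simp [h, ih]
    · simp [h]

-- A's set has more than one element iff some later element differs from the first
lemma pvSet_gt_one (x : Int) (m : List Int) :
    (1 < (PySem.Set.ofList (x :: m)).length) ↔ ∃ y ∈ m, y ≠ x := by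
  constructor
  · intro h
    by_contra hc
    push Not at hc
    have hall : ∀ z ∈ PySem.Set.ofList (x :: m), z = x := by
      intro z hz
      rcases List.mem_cons.1 ((PySem.Set.mem_ofList _ _).1 hz) with h1 | h2
      · exact h1
      · exact hc z h2
    have hnd := PySem.Set.nodup_ofList (xs := x :: m)
    match hs : PySem.Set.ofList (x :: m) with
    | [] => rw [hs] at h; simp at h
    | [a] => rw [hs] at h; simp at h
    | a :: b :: t =>
      rw [hs] at hall hnd
      have ha := hall a (by simp)
      have hb := hall b (by simp)
      rw [List.nodup_cons] at hnd
      exact hnd.1 (by simp [ha, hb])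
  · rintro ⟨y, hy, hyx⟩
    have hxm : x ∈ PySem.Set.ofList (x :: m) := (PySem.Set.mem_ofList _ _).2 (by simp)
    have hym : y ∈ PySem.Set.ofList (x :: m) := (PySem.Set.mem_ofList _ _).2 (by simp [hy])
    match hs : PySem.Set.ofList (x :: m) with
    | [] => rw [hs] at hxm; simp at hxm
    | [a] =>
      rw [hs] at hxm hym
      simp at hxm hym
      exact absurd (hym.trans hxm.symm) hyx
    | a :: b :: t => simp
-- bridge: A's set-cardinality test on fx :: map f l equals B's seeded loop
lemma pvBridge (n fx : Int) (l : List Int) :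
    (if 1 < (PySem.Set.ofList (fx :: l.map (fun op => PySem.Int.floordiv op n))).length
      then "persistent" else "batch_specific") = pvAltLoop n (some fx) l := by
  rw [pvAltLoop_some]
  simp only [pvSet_gt_one]
  simp [List.any_eq_true]

-- ===== VERDICT (by name: the statement is the Claim_ definition above) =====
theorem compute_tensor_lifetime_py_spec : Claim_equal_compute_tensor_lifetime_py := by
  intro tid tp tc n? _
  unfold Spec_compute_tensor_lifetime_py compute_tensor_lifetime_py compute_tensor_lifetime_py_alt
  match n? with
  | none => rfl
  | some n =>
    by_cases hn : n = 0
    · simp [hn]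
    · simp only [hn, if_false]
      rw [PySem.Dict.contains_eq_isSome_get? (d := PySem.Dict.mk tp),
          PySem.Dict.contains_eq_isSome_get? (d := PySem.Dict.mk tc),
          PySem.Dict.getD_eq_get?_getD]
      match PySem.Dict.get? (PySem.Dict.mk tp) tid, PySem.Dict.get? (PySem.Dict.mk tc) tid with
      | none, none => simp [pvAltLoop]
      | none, some l =>
        match l with
        | [] => simp [pvAltLoop]
        | c :: rest =>
          simp only [Option.isSome_none, Option.isSome_some, Option.map_some, Option.getD_some,
            Bool.false_eq_true, if_false, if_true, List.nil_append, List.map_cons]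
          rw [if_neg (by simp)]
          exact pvBridge n (PySem.Int.floordiv c n) rest
      | some p, none =>
        simp only [Option.isSome_none, Option.isSome_some, Option.map_some, Option.getD_none,
          Bool.false_eq_true, if_false, if_true, List.append_nil, List.map_cons, List.map_nil]
        rw [if_neg (by simp)]
        exact pvBridge n (PySem.Int.floordiv p n) []
      | some p, some l =>
        simp only [Option.isSome_some, Option.map_some, Option.getD_some, if_true,
          List.cons_append, List.nil_append, List.map_cons]
        rw [if_neg (by simp)]
        exact pvBridge n (PySem.Int.floordiv p n) l
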